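-- pv_equiv track=rewrite | github.com/cpwarmbi/project-continuum | pi/pi_main.py | find_longest_string_of_zeros
-- ===== SOURCE A (Python) =====
-- def find_longest_string_of_zeros(arr):
--     max_length = 0
--     current_length = 0
--     max_start_index = -1
--     max_end_index = -1
--     current_start_index = -1
--
--     for i, num in (arr):
--         if num == 0:
--             if current_length == 0:
--                 current_start_index = i  # Start of a new sequence of 0s
--             current_length += 1
--         else:
--             if current_length > max_length:
--                 max_length = current_length
--                 max_start_index = current_start_index
--                 max_end_index = i - 1
--             current_length = 0
--
--     # Final check in case the array ends with a sequence of 0s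
--     if current_length > max_length:
--         max_length = current_length
--         max_start_index = current_start_index
--         max_end_index = len(arr) - 1
--
--     return max_length, max_start_index, max_end_index
-- ===== SOURCE B (Python) =====
-- def find_longest_string_of_zeros(arr):
--     # One pass collecting each maximal zero-run as (length, start, end), then
--     # pick the first longest run (max with key keeps the first on ties).
--     runs = []
--     cur = None  # (start_index, length) of the currently open zero-run
--     for i, num in arr:
--         if num == 0:
--             cur = (i, 1) if cur is None else (cur[0], cur[1] + 1)
--         elif cur is not None:
--             runs.append((cur[1], cur[0], i - 1))
--             cur = None
--     if cur is not None:
--         runs.append((cur[1], cur[0], len(arr) - 1))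
--     if not runs:
--         return (0, -1, -1)
--     return max(runs, key=lambda r: r[0])
-- ===== Notes on version B (the rewrite author's own statement) =====
-- stated objective: alternative
-- what changed: B collects every maximal zero-run as (length, start, end) in one pass and afterwards picks the first longest with max(key=...), instead of A's online running-maximum state machine.
import Mathlib
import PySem

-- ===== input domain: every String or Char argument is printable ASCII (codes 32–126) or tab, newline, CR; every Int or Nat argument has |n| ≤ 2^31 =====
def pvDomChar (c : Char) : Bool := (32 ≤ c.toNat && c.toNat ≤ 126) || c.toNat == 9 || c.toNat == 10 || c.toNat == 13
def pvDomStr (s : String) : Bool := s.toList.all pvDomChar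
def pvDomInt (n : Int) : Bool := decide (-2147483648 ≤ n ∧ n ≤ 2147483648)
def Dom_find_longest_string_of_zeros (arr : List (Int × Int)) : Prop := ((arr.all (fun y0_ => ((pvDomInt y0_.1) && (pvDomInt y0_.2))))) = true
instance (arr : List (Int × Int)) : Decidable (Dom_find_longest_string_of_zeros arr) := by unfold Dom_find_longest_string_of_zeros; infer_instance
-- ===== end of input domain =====

-- B (alternative, same cost): collect each maximal zero-run in one pass, then pick the first longest.

-- ===== PORT A =====
-- state: (max_length, current_length, max_start_index, max_end_index, current_start_index)
def flszStepA (s : Int × Int × Int × Int × Int) (p : Int × Int) : Int × Int × Int × Int × Int :=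
  match s, p with
  | (maxL, curL, maxS, maxE, curS), (i, num) =>
    if num = 0 then
      (maxL, curL + 1, maxS, maxE, if curL = 0 then i else curS)
    else
      if curL > maxL then (curL, 0, curS, i - 1, curS)
      else (maxL, 0, maxS, maxE, curS)

def find_longest_string_of_zeros (arr : List (Int × Int)) : Int × Int × Int :=
  match arr.foldl flszStepA (0, 0, -1, -1, -1) with
  | (maxL, curL, maxS, maxE, curS) =>
    if curL > maxL then (curL, curS, (arr.length : Int) - 1)
    else (maxL, maxS, maxE)

-- ===== PORT B =====
-- state: (runs collected so far, currently open zero-run as (start, length))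
def flszStepB (s : List (Int × Int × Int) × Option (Int × Int)) (p : Int × Int) :
    List (Int × Int × Int) × Option (Int × Int) :=
  match s, p with
  | (runs, cur), (i, num) =>
    if num = 0 then
      (runs, some (match cur with | none => (i, 1) | some (st, l) => (st, l + 1)))
    else
      match cur with
      | none => (runs, none)
      | some (st, l) => (runs ++ [(l, st, i - 1)], none)

-- exact port of Python's max(runs, key=lambda r: r[0]): keeps the FIRST maximal element
def flszMaxByFst (runs : List (Int × Int × Int)) : Option (Int × Int × Int) :=
  match runs with
  | [] => none
  | r :: rest => some (rest.foldl (fun b x => if x.1 > b.1 then x else b) r)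

def find_longest_string_of_zeros_alt (arr : List (Int × Int)) : Int × Int × Int :=
  match arr.foldl flszStepB ([], none) with
  | (runs, cur) =>
    let runs' := match cur with
      | none => runs
      | some (st, l) => runs ++ [(l, st, (arr.length : Int) - 1)]
    match flszMaxByFst runs' with
    | none => (0, -1, -1)
    | some r => r

-- ===== PRECONDITION & SPEC =====
def Spec_find_longest_string_of_zeros (arr : List (Int × Int)) (out : Int × Int × Int) : Prop := out = find_longest_string_of_zeros_alt arr
instance (arr : List (Int × Int)) (out : Int × Int × Int) : Decidable (Spec_find_longest_string_of_zeros arr out) := by unfold Spec_find_longest_string_of_zeros; infer_instance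

-- ===== CLAIM (what is proved, stated in full; the proofs are below) =====
def Claim_equal_find_longest_string_of_zeros : Prop := ∀ (arr : List (Int × Int)), Dom_find_longest_string_of_zeros arr → Spec_find_longest_string_of_zeros arr (find_longest_string_of_zeros arr)

-- ===== LEMMAS AND PROOFS =====

-- running best with strict '>' (first maximal wins), started from the empty default
def flszBest (runs : List (Int × Int × Int)) : Int × Int × Int :=
  runs.foldl (fun b x => if x.1 > b.1 then x else b) (0, -1, -1)

-- A's finishing step, with the final end-index as a parameter
def flszFinA (s : Int × Int × Int × Int × Int) (last : Int) : Int × Int × Int :=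
  match s with
  | (maxL, curL, maxS, maxE, curS) =>
    if curL > maxL then (curL, curS, last) else (maxL, maxS, maxE)

-- B's finishing step
def flszFinB (s : List (Int × Int × Int) × Option (Int × Int)) (last : Int) : Int × Int × Int :=
  match s with
  | (runs, cur) =>
    let runs' := match cur with
      | none => runs
      | some (st, l) => runs ++ [(l, st, last)]
    match flszMaxByFst runs' with
    | none => (0, -1, -1)
    | some r => r

-- the invariant tying A's state to B's state
def flszInv (sA : Int × Int × Int × Int × Int) (sB : List (Int × Int × Int) × Option (Int × Int)) : Prop :=
  flszBest sB.1 = (sA.1, sA.2.2.1, sA.2.2.2.1) ∧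
  (∀ r ∈ sB.1, 0 < r.1) ∧
  0 ≤ sA.1 ∧
  ((sA.2.1 = 0 ∧ sB.2 = none) ∨ (0 < sA.2.1 ∧ sB.2 = some (sA.2.2.2.2, sA.2.1)))

theorem flszBest_append (runs : List (Int × Int × Int)) (r : Int × Int × Int) :
    flszBest (runs ++ [r]) = if r.1 > (flszBest runs).1 then r else flszBest runs := by
  simp [flszBest]

theorem flszMaxByFst_eq (runs : List (Int × Int × Int)) (h : ∀ r ∈ runs, 0 < r.1) (hne : runs ≠ []) :
    flszMaxByFst runs = some (flszBest runs) := by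
  cases runs with
  | nil => exact absurd rfl hne
  | cons r rest =>
    have hr : 0 < r.1 := h r (by simp)
    simp [flszMaxByFst, flszBest]
    have : ((0 : Int), (-1 : Int), (-1 : Int)).1 < r.1 := hr
    rw [if_pos this]

theorem flszInv_step (sA : Int × Int × Int × Int × Int) (sB : List (Int × Int × Int) × Option (Int × Int))
    (p : Int × Int) (h : flszInv sA sB) : flszInv (flszStepA sA p) (flszStepB sB p) := by
  obtain ⟨maxL, curL, maxS, maxE, curS⟩ := sA
  obtain ⟨runs, cur⟩ := sB
  obtain ⟨i, num⟩ := p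
  obtain ⟨hb, hpos, hm, hc⟩ := h
  simp only [flszInv] at *
  by_cases hz : num = 0
  · rcases hc with ⟨h0, hn⟩ | ⟨h1, hs⟩
    · subst h0 hn
      refine ⟨?_, ?_, ?_, Or.inr ⟨?_, ?_⟩⟩
      · simpa [flszStepA, flszStepB, hz] using hb
      · simpa [flszStepB, hz] using hpos
      · simpa [flszStepA, hz] using hm
      · simp [flszStepA, hz]
      · simp [flszStepA, flszStepB, hz]
    · subst hs
      refine ⟨?_, ?_, ?_, Or.inr ⟨?_, ?_⟩⟩
      · simpa [flszStepA, flszStepB, hz] using hb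
      · simpa [flszStepB, hz] using hpos
      · simpa [flszStepA, hz] using hm
      · simp [flszStepA, hz]; omega
      · simp [flszStepA, flszStepB, hz, if_neg (by omega : ¬ curL = 0)]
  · rcases hc with ⟨h0, hn⟩ | ⟨h1, hs⟩
    · subst h0 hn
      simp only [flszStepA, flszStepB, if_neg hz]
      rw [if_neg (by omega : ¬ (0:Int) > maxL)]
      exact ⟨hb, hpos, hm, Or.inl ⟨by trivial, by trivial⟩⟩
    · subst hs
      simp only [flszStepA, flszStepB, if_neg hz]
      by_cases hgt : curL > maxL
      · rw [if_pos hgt]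
        refine ⟨?_, ?_, by omega, Or.inl ⟨by trivial, by trivial⟩⟩
        · rw [flszBest_append, hb]
          simp [hgt]
        · intro r hr
          rcases List.mem_append.1 hr with h' | h'
          · exact hpos r h'
          · simp at h'; subst h'; exact h1
      · rw [if_neg hgt]
        refine ⟨?_, ?_, hm, Or.inl ⟨by trivial, by trivial⟩⟩
        · rw [flszBest_append, hb]
          simp only
          rw [if_neg (by simpa using hgt)]
        · intro r hr
          rcases List.mem_append.1 hr with h' | h'
          · exact hpos r h'
          · simp at h'; subst h'; exact h1

theorem flszFin_eq (sA : Int × Int × Int × Int × Int) (sB : List (Int × Int × Int) × Option (Int × Int))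
    (last : Int) (h : flszInv sA sB) : flszFinA sA last = flszFinB sB last := by
  obtain ⟨maxL, curL, maxS, maxE, curS⟩ := sA
  obtain ⟨runs, cur⟩ := sB
  obtain ⟨hb, hpos, hm, hc⟩ := h
  simp only at hb hpos hm hc
  rcases hc with ⟨h0, hn⟩ | ⟨h1, hs⟩
  · subst h0 hn
    simp only [flszFinA, flszFinB]
    rw [if_neg (by omega : ¬ (0:Int) > maxL)]
    cases hruns : runs with
    | nil =>
      subst hruns
      have h' : flszBest ([] : List (Int × Int × Int)) = (maxL, maxS, maxE) := hb
      simp [flszBest] at h'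
      simp [flszMaxByFst, ← h'.1, ← h'.2.1, ← h'.2.2]
    | cons r rest =>
      subst hruns
      rw [flszMaxByFst_eq _ hpos (by simp)]
      simp [hb]
  · subst hs
    simp only [flszFinA, flszFinB]
    have hpos' : ∀ r ∈ runs ++ [(curL, curS, last)], 0 < r.1 := by
      intro r hr
      rcases List.mem_append.1 hr with h' | h'
      · exact hpos r h'
      · simp at h'; subst h'; exact h1
    rw [flszMaxByFst_eq _ hpos' (by simp)]
    rw [flszBest_append, hb]

theorem flszLoop (arr : List (Int × Int)) (sA : Int × Int × Int × Int × Int)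
    (sB : List (Int × Int × Int) × Option (Int × Int)) (last : Int) (h : flszInv sA sB) :
    flszFinA (arr.foldl flszStepA sA) last = flszFinB (arr.foldl flszStepB sB) last := by
  induction arr generalizing sA sB with
  | nil => exact flszFin_eq sA sB last h
  | cons p rest ih => exact ih _ _ (flszInv_step sA sB p h)

-- ===== VERDICT (by name: the statement is the Claim_ definition above) =====
theorem find_longest_string_of_zeros_spec : Claim_equal_find_longest_string_of_zeros := by
  intro arr _
  show find_longest_string_of_zeros arr = find_longest_string_of_zeros_alt arr
  have h := flszLoop arr (0, 0, -1, -1, -1) ([], none) ((arr.length : Int) - 1)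
    ⟨by simp [flszBest], by simp, le_refl 0, Or.inl ⟨by trivial, by trivial⟩⟩
  simpa [find_longest_string_of_zeros, find_longest_string_of_zeros_alt, flszFinA, flszFinB]
    using h
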